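-- pv_equiv track=rewrite | github.com/waltwood/aoc-2023 | 3/main.py | load_part_numbers
-- ===== SOURCE A (Python) =====
-- def load_part_numbers(lines: list) -> list:
--     part_numbers = []
--     for row, ln in enumerate(lines):
--         num_s = ""
--         coords = []
--         for col, ch in enumerate(ln):
--             if ch.isdigit():
--                 num_s = num_s + ch
--                 coords.append((row, col))
--             else:
--                 if num_s:
--                     part_numbers.append((num_s, coords))
--                 num_s = ""
--                 coords = []
--         if num_s:  # last num in row
--             part_numbers.append((num_s, coords))
--     return part_numbers
-- ===== SOURCE B (Python) =====
-- def load_part_numbers(lines: list) -> list: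
--     part_numbers = []
--     for row, ln in enumerate(lines):
--         i, n = 0, len(ln)
--         while i < n:
--             if ln[i].isdigit():
--                 j = i + 1
--                 while j < n and ln[j].isdigit():
--                     j += 1
--                 part_numbers.append((ln[i:j], [(row, c) for c in range(i, j)]))
--                 i = j
--             else:
--                 i += 1
--     return part_numbers
-- ===== Notes on version B (the rewrite author's own statement) =====
-- stated objective: faster
-- what changed: Replaces A's accumulator-plus-flush state machine (growing num_s/coords char by char and flushing on non-digits and end of line) with a two-pointer run scanner that finds each digit run's end index and emits the slice and coordinate range in one step, avoiding per-character string concatenation.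
import Mathlib
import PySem

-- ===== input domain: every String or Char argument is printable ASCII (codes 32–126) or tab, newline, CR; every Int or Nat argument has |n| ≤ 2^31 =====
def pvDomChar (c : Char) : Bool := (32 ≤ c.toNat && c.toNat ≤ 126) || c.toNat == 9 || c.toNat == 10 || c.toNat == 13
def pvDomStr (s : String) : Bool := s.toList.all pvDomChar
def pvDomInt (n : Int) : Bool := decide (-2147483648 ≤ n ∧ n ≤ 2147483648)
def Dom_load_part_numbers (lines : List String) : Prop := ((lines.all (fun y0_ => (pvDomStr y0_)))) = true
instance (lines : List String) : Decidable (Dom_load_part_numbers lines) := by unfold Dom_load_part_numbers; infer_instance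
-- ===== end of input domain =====

-- B replaces A's accumulator-and-flush state machine with a two-pointer digit-run scanner (alternative decomposition, same cost).

-- ===== PORT A =====
-- one step of A's inner loop: state = (num_s as chars, coords, part_numbers)
def pvStepA (row : Int)
    (st : List Char × List (Int × Int) × List (String × List (Int × Int)))
    (p : Int × Char) : List Char × List (Int × Int) × List (String × List (Int × Int)) :=
  if PySem.Chars.isdigit p.2 then (st.1 ++ [p.2], st.2.1 ++ [(row, p.1)], st.2.2)
  else ([], [], if st.1 = [] then st.2.2 else st.2.2 ++ [(String.ofList st.1, st.2.1)])

-- the 'if num_s: part_numbers.append(...)' flush after the inner loop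
def pvFinishA (st : List Char × List (Int × Int) × List (String × List (Int × Int))) :
    List (String × List (Int × Int)) :=
  if st.1 = [] then st.2.2 else st.2.2 ++ [(String.ofList st.1, st.2.1)]

-- A's body for one row (inner loop plus the end-of-line flush)
def pvLineA (row : Int) (ln : List Char) (acc : List (String × List (Int × Int))) :
    List (String × List (Int × Int)) :=
  pvFinishA ((PySem.List.enumerate ln 0).foldl (pvStepA row) ([], [], acc))

def load_part_numbers (lines : List String) : List (String × (List (Int × Int))) :=
  (PySem.List.enumerate lines 0).foldl (fun acc p => pvLineA p.1 p.2.toList acc) []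

-- ===== PORT B =====
-- two-pointer scan of one row: on a digit at col, take the whole run and emit slice + coordinate range
def pvRunsB (row : Int) : Int → List Char → List (String × List (Int × Int))
  | _, [] => []
  | col, c :: cs =>
    if PySem.Chars.isdigit c then
      let ds := cs.takeWhile PySem.Chars.isdigit
      (String.ofList (c :: ds),
        (PySem.List.pyRange col (col + 1 + ds.length) 1).map (fun k => (row, k)))
        :: pvRunsB row (col + 1 + ds.length) (cs.dropWhile PySem.Chars.isdigit)
    else pvRunsB row (col + 1) cs
  termination_by _ cs => cs.length
  decreasing_by
  · exact Nat.lt_succ_of_le (cs.length_dropWhile_le PySem.Chars.isdigit)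
  · exact Nat.lt_succ_self _

def load_part_numbers_alt (lines : List String) : List (String × (List (Int × Int))) :=
  (PySem.List.enumerate lines 0).flatMap (fun p => pvRunsB p.1 0 p.2.toList)

-- ===== PRECONDITION & SPEC =====
def Spec_load_part_numbers (lines : List String) (out : List (String × (List (Int × Int)))) : Prop := out = load_part_numbers_alt lines
instance (lines : List String) (out : List (String × (List (Int × Int)))) : Decidable (Spec_load_part_numbers lines out) := by unfold Spec_load_part_numbers; infer_instance

-- ===== CLAIM (what is proved, stated in full; the proofs are below) =====
def Claim_equal_load_part_numbers : Prop := ∀ (lines : List String), Dom_load_part_numbers lines → Spec_load_part_numbers lines (load_part_numbers lines)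

-- ===== LEMMAS AND PROOFS =====

-- A's remaining output for one row, from a pending state (num_s, coords): a recursive rendering of A's machine
def pvMergeA (row : Int) : List Char → List (Int × Int) → Int → List Char → List (String × List (Int × Int))
  | ns, co, _, [] => if ns = [] then [] else [(String.ofList ns, co)]
  | ns, co, col, c :: cs =>
    if PySem.Chars.isdigit c then pvMergeA row (ns ++ [c]) (co ++ [(row, col)]) (col + 1) cs
    else (if ns = [] then [] else [(String.ofList ns, co)]) ++ pvMergeA row [] [] (col + 1) cs

lemma foldA_eq (row : Int) : ∀ (cs : List Char) (col : Int) (ns : List Char)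
    (co : List (Int × Int)) (pns : List (String × List (Int × Int))),
    pvFinishA ((PySem.List.enumerate cs col).foldl (pvStepA row) (ns, co, pns))
    = pns ++ pvMergeA row ns co col cs := by
  intro cs
  induction cs with
  | nil =>
    intro col ns co pns
    simp only [PySem.List.enumerate_nil, List.foldl_nil, pvFinishA, pvMergeA]
    split_ifs <;> simp
  | cons c cs ih =>
    intro col ns co pns
    simp only [PySem.List.enumerate_cons, List.foldl_cons, pvMergeA]
    by_cases hd : PySem.Chars.isdigit c
    · simp only [pvStepA, hd, if_pos]
      exact ih (col + 1) (ns ++ [c]) (co ++ [(row, col)]) pns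
    · simp only [pvStepA, hd, if_false, Bool.false_eq_true]
      rw [ih (col + 1) [] []]
      split_ifs <;> simp
lemma mergeA_eq_runsB (row : Int) : ∀ (cs : List Char) (col : Int) (ns : List Char)
    (co : List (Int × Int)), (ns = [] → co = []) →
    pvMergeA row ns co col cs =
      if ns = [] then pvRunsB row col cs
      else (String.ofList (ns ++ cs.takeWhile PySem.Chars.isdigit),
              co ++ (PySem.List.pyRange col (col + (cs.takeWhile PySem.Chars.isdigit).length) 1).map (fun k => (row, k)))
            :: pvRunsB row (col + ((cs.takeWhile PySem.Chars.isdigit).length : Int)) (cs.dropWhile PySem.Chars.isdigit) := by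
  intro cs
  induction cs with
  | nil =>
    intro col ns co hco
    by_cases hns : ns = []
    · subst hns
      simp [pvMergeA, pvRunsB]
    · simp [pvMergeA, pvRunsB, hns]
  | cons c cs ih =>
    intro col ns co hco
    by_cases hd : PySem.Chars.isdigit c
    · simp only [pvMergeA, hd, if_pos, List.takeWhile_cons, List.dropWhile_cons, List.length_cons]
      rw [ih (col + 1) (ns ++ [c]) (co ++ [(row, col)]) (by simp)]
      rw [if_neg (by simp : ns ++ [c] ≠ [])]
      push_cast
      rw [show col + ((((cs.takeWhile PySem.Chars.isdigit).length : Int)) + 1)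
            = col + 1 + ((cs.takeWhile PySem.Chars.isdigit).length : Int) from by ring]
      by_cases hns : ns = []
      · subst hns
        rw [hco rfl]
        simp only [if_pos, List.nil_append, pvRunsB, hd]
        rw [PySem.List.pyRange_one_cons
          (show col < col + 1 + ((cs.takeWhile PySem.Chars.isdigit).length : Int) from by omega)]
        simp
      · rw [if_neg hns]
        rw [PySem.List.pyRange_one_cons
          (show col < col + 1 + ((cs.takeWhile PySem.Chars.isdigit).length : Int) from by omega)]
        simp [List.append_assoc]
    · simp only [pvMergeA, hd, Bool.false_eq_true, if_false, List.takeWhile_cons,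
        List.dropWhile_cons, List.length_nil]
      rw [ih (col + 1) [] [] (fun _ => rfl)]
      by_cases hns : ns = []
      · subst hns
        simp [pvRunsB, hd]
      · simp [hns, pvRunsB, hd]
lemma lineA_eq (row : Int) (cs : List Char) (acc : List (String × List (Int × Int))) :
    pvLineA row cs acc = acc ++ pvRunsB row 0 cs := by
  rw [pvLineA, foldA_eq row cs 0 [] [] acc, mergeA_eq_runsB row cs 0 [] [] (fun _ => rfl)]
  simp

-- ===== VERDICT (by name: the statement is the Claim_ definition above) =====
theorem load_part_numbers_spec : Claim_equal_load_part_numbers := by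
  intro lines _
  unfold Spec_load_part_numbers load_part_numbers load_part_numbers_alt
  simp only [lineA_eq]
  rw [PySem.List.foldl_append_eq_flatMap]
  simp
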